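-- pv_equiv track=rewrite | github.com/BananaNosh/EulerProject | problem_1-7.py | even_fibonaccis
-- ===== SOURCE A (Python) =====
-- def even_fibonaccis(limit):
--     even = [2]
--     first = 1
--     second = 2
--     while True:
--         first = second + first
--         second = first + second
--         if first > limit:
--             break
--         if first % 2 == 0:
--             even.append(first)
--         if second > limit:
--             break
--         if second % 2 == 0:
--             even.append(second)
--     return even
-- ===== SOURCE B (Python) =====
-- def even_fibonaccis(limit):
--     even = [2]
--     a, b = 2, 8
--     while b <= limit:
--         even.append(b)
--         a, b = b, 4 * b + a
--     return even
-- ===== Notes on version B (the rewrite author's own statement) =====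
-- stated objective: simpler
-- what changed: B generates only the even Fibonacci numbers directly via the recurrence e_k = 4*e_{k-1} + e_{k-2} (seeded with 2, 8), so the parity tests and two-thirds of the loop iterations of A disappear.
import Mathlib
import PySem

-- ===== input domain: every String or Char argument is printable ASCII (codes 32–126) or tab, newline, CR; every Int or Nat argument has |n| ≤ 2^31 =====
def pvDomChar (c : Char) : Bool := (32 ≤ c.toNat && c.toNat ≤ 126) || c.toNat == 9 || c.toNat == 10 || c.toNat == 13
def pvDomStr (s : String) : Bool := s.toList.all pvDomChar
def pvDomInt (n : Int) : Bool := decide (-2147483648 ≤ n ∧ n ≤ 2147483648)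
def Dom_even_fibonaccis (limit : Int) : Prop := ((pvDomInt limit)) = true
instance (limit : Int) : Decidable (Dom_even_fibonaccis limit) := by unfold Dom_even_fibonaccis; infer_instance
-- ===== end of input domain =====

-- B replaces A's full Fibonacci loop with parity tests by the even-Fibonacci recurrence
-- e_k = 4*e_{k-1} + e_{k-2}, which is shorter and skips the odd terms entirely (objective: simpler).

-- ===== PORT A =====
-- A's while-True loop; the invariants 0 < f < s (true from the start 1 < 2 and preserved)
-- are carried as proof arguments only to justify termination: f strictly grows each pass.
def even_fibonaccis_loop (limit f s : Int) (even : List Int)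
    (hf : 0 < f) (hfs : f < s) : List Int :=
  -- first = second + first; second = first + second
  if _h1 : s + f > limit then even
  else
    let even1 := if (s + f) % 2 = 0 then even ++ [s + f] else even
    if _h2 : (s + f) + s > limit then even1
    else
      let even2 := if ((s + f) + s) % 2 = 0 then even1 ++ [(s + f) + s] else even1
      even_fibonaccis_loop limit (s + f) ((s + f) + s) even2 (by omega) (by omega)
termination_by (limit + 1 - f).toNat
decreasing_by omega

def even_fibonaccis (limit : Int) : List Int :=
  even_fibonaccis_loop limit 1 2 [2] (by omega) (by omega)

-- ===== PORT B =====
-- Source B's while b <= limit loop; 0 < a < b carried as proof arguments for termination only.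
def even_fibonaccis_alt_loop (limit a b : Int) (even : List Int)
    (ha : 0 < a) (hab : a < b) : List Int :=
  if _h : b > limit then even
  else even_fibonaccis_alt_loop limit b (4 * b + a) (even ++ [b]) (by omega) (by omega)
termination_by (limit + 1 - b).toNat
decreasing_by omega

def even_fibonaccis_alt (limit : Int) : List Int :=
  even_fibonaccis_alt_loop limit 2 8 [2] (by omega) (by omega)

-- ===== PRECONDITION & SPEC =====
def Spec_even_fibonaccis (limit : Int) (out : List Int) : Prop := out = even_fibonaccis_alt limit
instance (limit : Int) (out : List Int) : Decidable (Spec_even_fibonaccis limit out) := by unfold Spec_even_fibonaccis; infer_instance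

-- ===== CLAIM (what is proved, stated in full; the proofs are below) =====
def Claim_equal_even_fibonaccis : Prop := ∀ (limit : Int), Dom_even_fibonaccis limit → Spec_even_fibonaccis limit (even_fibonaccis limit)

-- ===== LEMMAS AND PROOFS =====

-- the proof arguments are irrelevant; only the Int argument b matters
theorem even_fibonaccis_alt_loop_congr (limit a b a' b' : Int) (even : List Int)
    (ha : 0 < a) (hab : a < b) (ha' : 0 < a') (hab' : a' < b') (hA : a = a') (hB : b = b') :
    even_fibonaccis_alt_loop limit a b even ha hab
      = even_fibonaccis_alt_loop limit a' b' even ha' hab' := by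
  subst hA; subst hB; rfl

-- Three iterations of A (pairs (s+f, f+2s), (2f+3s, 3f+5s), (5f+8s, 8f+13s), parities
-- (odd,odd), (even,odd), (odd,even)) append exactly the evens 2f+3s and 8f+13s and match
-- two iterations of B from (a, b) = (s, 3s+2f).
theorem loopA_eq_loopB (limit f s : Int) (even : List Int)
    (hf : 0 < f) (hfs : f < s) (hfo : f % 2 = 1) (hse : s % 2 = 0) :
    even_fibonaccis_loop limit f s even hf hfs
      = even_fibonaccis_alt_loop limit s (3 * s + 2 * f) even (by omega) (by omega) := by
  rw [even_fibonaccis_loop, even_fibonaccis_alt_loop]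
  by_cases h1 : s + f > limit
  · rw [dif_pos h1, dif_pos (by omega : 3 * s + 2 * f > limit)]
  · rw [dif_neg h1]
    simp only [if_neg (show ¬ ((s + f) % 2 = 0) by omega)]
    by_cases h2 : (s + f) + s > limit
    · rw [dif_pos h2, dif_pos (by omega : 3 * s + 2 * f > limit)]
    · rw [dif_neg h2]
      simp only [if_neg (show ¬ (((s + f) + s) % 2 = 0) by omega)]
      rw [even_fibonaccis_loop]
      by_cases h3 : ((s + f) + s) + (s + f) > limit
      · rw [dif_pos h3, dif_pos (by omega : 3 * s + 2 * f > limit)]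
      · rw [dif_neg h3, dif_neg (by omega : ¬ (3 * s + 2 * f > limit))]
        simp only [if_pos (show (((s + f) + s) + (s + f)) % 2 = 0 by omega)]
        rw [even_fibonaccis_alt_loop]
        by_cases h4 : (((s + f) + s) + (s + f)) + ((s + f) + s) > limit
        · rw [dif_pos h4,
            dif_pos (by omega : 4 * (3 * s + 2 * f) + s > limit),
            show even ++ [3 * s + 2 * f] = even ++ [((s + f) + s) + (s + f)] from by rw [show (3:ℤ) * s + 2 * f = ((s + f) + s) + (s + f) from by ring]]
        · rw [dif_neg h4]
          simp only [if_neg (show ¬ ((((s + f) + s) + (s + f)) + ((s + f) + s)) % 2 = 0 by omega)]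
          rw [even_fibonaccis_loop]
          by_cases h5 : ((((s + f) + s) + (s + f)) + ((s + f) + s)) + (((s + f) + s) + (s + f)) > limit
          · rw [dif_pos h5,
              dif_pos (by omega : 4 * (3 * s + 2 * f) + s > limit),
              show even ++ [3 * s + 2 * f] = even ++ [((s + f) + s) + (s + f)] from by rw [show (3:ℤ) * s + 2 * f = ((s + f) + s) + (s + f) from by ring]]
          · rw [dif_neg h5]
            simp only [if_neg (show ¬ (((((s + f) + s) + (s + f)) + ((s + f) + s)) + (((s + f) + s) + (s + f))) % 2 = 0 by omega)]
            by_cases h6 : (((((s + f) + s) + (s + f)) + ((s + f) + s)) + (((s + f) + s) + (s + f))) + ((((s + f) + s) + (s + f)) + ((s + f) + s)) > limit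
            · rw [dif_pos h6,
                dif_pos (by omega : 4 * (3 * s + 2 * f) + s > limit),
                show even ++ [3 * s + 2 * f] = even ++ [((s + f) + s) + (s + f)] from by rw [show (3:ℤ) * s + 2 * f = ((s + f) + s) + (s + f) from by ring]]
            · rw [dif_neg h6, dif_neg (by omega : ¬ (4 * (3 * s + 2 * f) + s > limit))]
              simp only [if_pos (show ((((((s + f) + s) + (s + f)) + ((s + f) + s)) + (((s + f) + s) + (s + f))) + ((((s + f) + s) + (s + f)) + ((s + f) + s))) % 2 = 0 by omega)]
              rw [show even ++ [3 * s + 2 * f] ++ [4 * (3 * s + 2 * f) + s]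
                     = even ++ [((s + f) + s) + (s + f)] ++ [(((((s + f) + s) + (s + f)) + ((s + f) + s)) + (((s + f) + s) + (s + f))) + ((((s + f) + s) + (s + f)) + ((s + f) + s))] from by
                    rw [show (3:ℤ) * s + 2 * f = ((s + f) + s) + (s + f) from by ring,
                        show (4:ℤ) * (((s + f) + s) + (s + f)) + s = (((((s + f) + s) + (s + f)) + ((s + f) + s)) + (((s + f) + s) + (s + f))) + ((((s + f) + s) + (s + f)) + ((s + f) + s)) from by ring]]
              rw [loopA_eq_loopB]
              · exact even_fibonaccis_alt_loop_congr _ _ _ _ _ _ _ _ _ _ (by ring) (by ring)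
              · omega
              · omega
termination_by (limit + 1 - s).toNat
decreasing_by omega

-- ===== VERDICT (by name: the statement is the Claim_ definition above) =====
theorem even_fibonaccis_spec : Claim_equal_even_fibonaccis := by
  intro limit _
  show even_fibonaccis limit = even_fibonaccis_alt limit
  rw [even_fibonaccis, even_fibonaccis_alt, loopA_eq_loopB limit 1 2 [2] (by omega) (by omega) rfl rfl]
  exact even_fibonaccis_alt_loop_congr limit 2 (3 * 2 + 2 * 1) 2 8 [2] (by omega) (by omega) (by omega) (by omega) rfl (by norm_num)
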